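-- pv_equiv track=rewrite | github.com/houshuang/petrarca | scripts/explore_topic.py | _format_concepts_for_prompt
-- ===== SOURCE A (Python) =====
-- def _format_concepts_for_prompt(concepts: list[dict], max_concepts: int = 80) -> str:
--     """Format concepts into a compact string for the prompt."""
--     if not concepts:
--         return "No existing concepts available."
--
--     # Group by topic for readability
--     by_topic: dict[str, list[dict]] = {}
--     for c in concepts[:max_concepts]:
--         topic = c.get("topic", "other")
--         by_topic.setdefault(topic, []).append(c)
--
--     lines = []
--     for topic, topic_concepts in sorted(by_topic.items()):
--         lines.append(f"\n[{topic}]")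
--         for c in topic_concepts:
--             lines.append(f"  - {c['id']}: {c['text']}")
--
--     return "\n".join(lines)
-- ===== SOURCE B (Python) =====
-- def _format_concepts_for_prompt(concepts: list[dict], max_concepts: int = 80) -> str:
--     """Format concepts into a compact string for the prompt."""
--     if not concepts:
--         return "No existing concepts available."
--
--     # Stable-sort the truncated list by topic, then emit a header whenever
--     # the topic changes in one pass (no intermediate dict of groups).
--     ordered = sorted(concepts[:max_concepts], key=lambda c: c.get("topic", "other"))
--
--     lines = []
--     prev = None
--     for c in ordered:
--         topic = c.get("topic", "other")
--         if prev != topic: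
--             lines.append(f"\n[{topic}]")
--             prev = topic
--         lines.append(f"  - {c['id']}: {c['text']}")
--
--     return "\n".join(lines)
-- ===== Notes on version B (the rewrite author's own statement) =====
-- stated objective: idiomatic
-- what changed: Replaces the dict-of-lists grouping plus sorted(items) with a single stable sort of the truncated list by topic followed by one linear pass that emits a header whenever the topic changes; Pre_ only excludes inputs where a listed concept lacks an 'id' or 'text' key, on which both A and B raise KeyError.
import Mathlib
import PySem

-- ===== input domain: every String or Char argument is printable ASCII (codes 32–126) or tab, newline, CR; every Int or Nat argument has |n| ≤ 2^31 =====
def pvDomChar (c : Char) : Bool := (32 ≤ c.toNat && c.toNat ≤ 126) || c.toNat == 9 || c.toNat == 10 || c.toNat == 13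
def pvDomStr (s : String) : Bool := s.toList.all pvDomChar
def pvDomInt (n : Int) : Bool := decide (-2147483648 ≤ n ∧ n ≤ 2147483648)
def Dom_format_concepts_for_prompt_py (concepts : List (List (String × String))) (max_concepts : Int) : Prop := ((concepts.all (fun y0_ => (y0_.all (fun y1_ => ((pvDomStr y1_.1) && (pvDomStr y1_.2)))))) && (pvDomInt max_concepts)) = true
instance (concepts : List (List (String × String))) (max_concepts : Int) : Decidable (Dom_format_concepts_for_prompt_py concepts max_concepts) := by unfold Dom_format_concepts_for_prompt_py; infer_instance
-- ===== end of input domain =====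

-- B replaces A's dict-of-lists grouping + sorted(items) by one stable sort by topic and a
-- single pass emitting a header on each topic change (idiomatic; same asymptotic cost).
-- ===== PORT A =====
-- c.get("topic", "other")  (shared field accessors; a concept dict is an association list)
def fcTopic (c : List (String × String)) : String := (PySem.Dict.mk c).getD "topic" "other"
-- f"  - {c['id']}: {c['text']}"  (c['id'] raises KeyError when absent: Pre_ excludes that, the default "" is never used inside Pre_)
def fcLine (c : List (String × String)) : String :=
  "  - " ++ (PySem.Dict.mk c).getD "id" "" ++ ": " ++ (PySem.Dict.mk c).getD "text" ""

-- literal port of A: group the truncated list into a dict (setdefault(t, []).append(c), i.e.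
-- d[t] = d.get(t, []) + [c], modelled by Dict.modify), then iterate sorted(by_topic.items());
-- Python compares the (topic, list) pairs, but topics (the keys) are distinct so only the
-- first components are ever compared: ported as sorted with key = first component.
def format_concepts_for_prompt_py (concepts : List (List (String × String))) (max_concepts : Int) : String :=
  if concepts = [] then "No existing concepts available." else
    let byTopic : PySem.Dict String (List (List (String × String))) :=
      (PySem.List.slice concepts none (some max_concepts)).foldl
        (fun d c => d.modify (fcTopic c) [] (· ++ [c])) PySem.Dict.empty
    let lines : List String :=
      (PySem.List.sorted byTopic.items (fun p => p.1)).foldl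
        (fun acc p => p.2.foldl (fun a c => a ++ [fcLine c]) (acc ++ ["\n[" ++ p.1 ++ "]"])) []
    PySem.Str.join "\n" lines

-- ===== PORT B =====
-- literal port of B: stable sort of the truncated list by topic, then one pass with the
-- previous topic as state (prev = None initially), emitting a header when the topic changes.
def format_concepts_for_prompt_py_alt (concepts : List (List (String × String))) (max_concepts : Int) : String :=
  if concepts = [] then "No existing concepts available." else
    let ordered := PySem.List.sorted (PySem.List.slice concepts none (some max_concepts)) fcTopic
    let st := ordered.foldl
      (fun (st : List String × Option String) c =>
        let topic := fcTopic c
        let st := if st.2 ≠ some topic then (st.1 ++ ["\n[" ++ topic ++ "]"], some topic) else st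
        (st.1 ++ [fcLine c], st.2))
      ([], none)
    PySem.Str.join "\n" st.1

-- ===== PRECONDITION & SPEC =====
-- Pre_ excludes exactly the inputs on which A raises KeyError: a concept within the
-- truncated list missing the "id" or the "text" key (B raises there too).
def Pre_format_concepts_for_prompt_py (concepts : List (List (String × String))) (max_concepts : Int) : Prop :=
  ∀ c ∈ PySem.List.slice concepts none (some max_concepts),
    (PySem.Dict.mk c).contains "id" = true ∧ (PySem.Dict.mk c).contains "text" = true
instance (concepts : List (List (String × String))) (max_concepts : Int) : Decidable (Pre_format_concepts_for_prompt_py concepts max_concepts) := by unfold Pre_format_concepts_for_prompt_py; infer_instance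
def pvWitness_format_concepts_for_prompt_py : (List (List (String × String))) × Int :=
  ([[("id", "a"), ("text", "alpha"), ("topic", "t1")], [("id", "b"), ("text", "beta")]], 80)

def Spec_format_concepts_for_prompt_py (concepts : List (List (String × String))) (max_concepts : Int) (out : String) : Prop := out = format_concepts_for_prompt_py_alt concepts max_concepts
instance (concepts : List (List (String × String))) (max_concepts : Int) (out : String) : Decidable (Spec_format_concepts_for_prompt_py concepts max_concepts out) := by unfold Spec_format_concepts_for_prompt_py; infer_instance

-- ===== CLAIM (what is proved, stated in full; the proofs are below) =====
def Claim_equal_format_concepts_for_prompt_py : Prop := ∀ (concepts : List (List (String × String))) (max_concepts : Int), Dom_format_concepts_for_prompt_py concepts max_concepts → Pre_format_concepts_for_prompt_py concepts max_concepts → Spec_format_concepts_for_prompt_py concepts max_concepts (format_concepts_for_prompt_py concepts max_concepts)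

-- ===== LEMMAS AND PROOFS =====

-- the group of topic k in s (insertion order, as both A's dict values and a stable sort keep it)
def pvGrp (s : List (List (String × String))) (k : String) : List (List (String × String)) :=
  s.filter (fun c => fcTopic c == k)

-- the distinct topics of s in sorted order
def pvSK (s : List (List (String × String))) : List String :=
  PySem.List.sorted (PySem.Set.ofList (s.map fcTopic)) (fun x => x)

def pvHdr (k : String) : String := "\n[" ++ k ++ "]"

theorem pvGrp_key {s : List (List (String × String))} {k : String} {c : List (String × String)}
    (hc : c ∈ pvGrp s k) : fcTopic c = k := by
  have := List.of_mem_filter hc; simpa using this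

theorem pvGrp_append_one (s : List (List (String × String))) (x : List (String × String)) (k : String) :
    pvGrp (s ++ [x]) k = pvGrp s k ++ if fcTopic x == k then [x] else [] := by
  simp [pvGrp, List.filter_append, List.filter_cons]

theorem pvGrp_ne_nil {s : List (List (String × String))} {k : String}
    (h : ∃ c ∈ s, fcTopic c = k) : pvGrp s k ≠ [] := by
  rcases h with ⟨c, hcs, hck⟩
  have : c ∈ pvGrp s k := List.mem_filter.mpr ⟨hcs, by simp [hck]⟩
  intro hnil; rw [hnil] at this; cases this

-- two strictly increasing lists that are permutations of each other are equal
theorem pairwise_lt_eq_of_perm {l1 l2 : List String} (hp : l1.Perm l2)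
    (h1 : l1.Pairwise (· < ·)) (h2 : l2.Pairwise (· < ·)) : l1 = l2 :=
  List.Perm.eq_of_pairwise (fun _ _ _ _ hab hba => absurd hba (lt_asymm hab)) h1 h2 hp

theorem pvSK_pairwise (s : List (List (String × String))) : (pvSK s).Pairwise (· < ·) :=
  PySem.List.sorted_ofList_pairwise_lt _

theorem pvSK_perm (s : List (List (String × String))) :
    (pvSK s).Perm (PySem.Set.ofList (s.map fcTopic)) :=
  PySem.List.sorted_perm _ _ _

theorem mem_pvSK {s : List (List (String × String))} {k : String} :
    k ∈ pvSK s ↔ ∃ c ∈ s, fcTopic c = k := by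
  rw [(pvSK_perm s).mem_iff, PySem.Set.mem_ofList]
  simp [eq_comm]

-- a strictly increasing list containing k0 is (elements < k0) ++ k0 :: (elements > k0)
theorem pairwise_decomp_mem {l : List String} {k0 : String} (hp : l.Pairwise (· < ·)) (hm : k0 ∈ l) :
    l = l.filter (fun a => decide (a < k0)) ++ k0 :: l.filter (fun a => decide (k0 < a)) := by
  induction l with
  | nil => cases hm
  | cons y t ih =>
    rcases List.pairwise_cons.mp hp with ⟨hht, hpt⟩
    rw [List.filter_cons, List.filter_cons]
    by_cases hyk : y = k0
    · subst hyk
      have h1 : t.filter (fun a => decide (a < y)) = [] :=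
        List.filter_eq_nil_iff.mpr
          (fun a ha => by simp only [decide_eq_true_eq]; exact lt_asymm (hht a ha))
      have h2 : t.filter (fun a => decide (y < a)) = t :=
        List.filter_eq_self.mpr (fun a ha => decide_eq_true (hht a ha))
      rw [if_neg (by simp only [decide_eq_true_eq]; exact lt_irrefl y),
          if_neg (by simp only [decide_eq_true_eq]; exact lt_irrefl y), h1, h2]
      rfl
    · have hmt : k0 ∈ t := (List.mem_cons.mp hm).resolve_left (fun h => hyk h.symm)
      have hlt : y < k0 := hht k0 hmt
      rw [if_pos (decide_eq_true hlt),
          if_neg (by simp only [decide_eq_true_eq]; exact lt_asymm hlt), List.cons_append]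
      exact congrArg (y :: ·) (ih hpt hmt)

-- a strictly increasing list not containing k0 is (elements < k0) ++ (elements > k0)
theorem pairwise_decomp_not_mem {l : List String} {k0 : String} (hp : l.Pairwise (· < ·))
    (hm : k0 ∉ l) :
    l = l.filter (fun a => decide (a < k0)) ++ l.filter (fun a => decide (k0 < a)) := by
  induction l with
  | nil => rfl
  | cons y t ih =>
    rcases List.pairwise_cons.mp hp with ⟨hht, hpt⟩
    rw [List.filter_cons, List.filter_cons]
    have hyk : y ≠ k0 := fun h => hm (h ▸ List.mem_cons_self)
    rcases lt_or_gt_of_ne hyk with hlt | hgt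
    · rw [if_pos (decide_eq_true hlt),
          if_neg (by simp only [decide_eq_true_eq]; exact lt_asymm hlt), List.cons_append]
      exact congrArg (y :: ·) (ih hpt (fun h => hm (List.mem_cons_of_mem _ h)))
    · have h1 : t.filter (fun a => decide (a < k0)) = [] :=
        List.filter_eq_nil_iff.mpr
          (fun a ha => by simp only [decide_eq_true_eq]; exact lt_asymm (lt_trans hgt (hht a ha)))
      have h2 : t.filter (fun a => decide (k0 < a)) = t :=
        List.filter_eq_self.mpr (fun a ha => decide_eq_true (lt_trans hgt (hht a ha)))
      rw [if_neg (by simp only [decide_eq_true_eq]; exact lt_asymm hgt),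
          if_pos (decide_eq_true hgt), h1, h2]
      rfl

-- insertBy places x after everything not strictly greater and before everything strictly greater
theorem ins_split (x : List (String × String)) (A B : List (List (String × String)))
    (hA : ∀ a ∈ A, ¬ fcTopic x < fcTopic a) (hB : ∀ b ∈ B, fcTopic x < fcTopic b) :
    PySem.List.insertBy (fun a b => decide (fcTopic a < fcTopic b)) x (A ++ B) = A ++ x :: B := by
  induction A with
  | nil =>
    cases B with
    | nil => rfl
    | cons b t =>
      show PySem.List.insertBy _ x (b :: t) = x :: b :: t
      rw [PySem.List.insertBy]
      rw [if_pos (decide_eq_true (hB b List.mem_cons_self))]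
  | cons a t ih =>
    show PySem.List.insertBy _ x (a :: (t ++ B)) = a :: (t ++ x :: B)
    rw [PySem.List.insertBy]
    rw [if_neg (by simp only [decide_eq_true_eq]; exact hA a List.mem_cons_self)]
    exact congrArg (a :: ·) (ih (fun a' ha' => hA a' (List.mem_cons_of_mem _ ha')))

theorem sorted_append_one (s : List (List (String × String))) (x : List (String × String)) :
    PySem.List.sorted (s ++ [x]) fcTopic
      = PySem.List.insertBy (fun a b => decide (fcTopic a < fcTopic b)) x
          (PySem.List.sorted s fcTopic) := by
  rw [PySem.List.sorted_eq_foldl_insertBy, PySem.List.sorted_eq_foldl_insertBy, List.foldl_append]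
  rfl

-- STABILITY of the stable sort: sorting by topic concatenates the original-order groups
-- in sorted topic order
theorem sorted_key_eq_flatMap_grp (s : List (List (String × String))) :
    PySem.List.sorted s fcTopic = (pvSK s).flatMap (pvGrp s) := by
  induction s using List.reverseRecOn with
  | nil => rfl
  | append_singleton s x ih =>
    set k0 := fcTopic x with hk0
    have hK' : PySem.Set.ofList ((s ++ [x]).map fcTopic)
        = PySem.Set.add (PySem.Set.ofList (s.map fcTopic)) k0 := by
      rw [List.map_append]; exact PySem.Set.ofList_append_singleton _ _
    have hKf : ∀ (p : String → Bool), p k0 = false →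
        (PySem.Set.ofList ((s ++ [x]).map fcTopic)).filter p
          = (PySem.Set.ofList (s.map fcTopic)).filter p := by
      intro p hpk
      rw [hK', PySem.Set.add_eq_ite]
      split
      · rfl
      · rw [List.filter_append, List.filter_cons, hpk]
        simp
    have hfL : (pvSK (s ++ [x])).filter (fun a => decide (a < k0))
        = (pvSK s).filter (fun a => decide (a < k0)) := by
      apply pairwise_lt_eq_of_perm _ ((pvSK_pairwise _).filter _) ((pvSK_pairwise _).filter _)
      have h1 := (pvSK_perm (s ++ [x])).filter (fun a => decide (a < k0))
      rw [hKf _ (decide_eq_false (lt_irrefl k0))] at h1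
      exact h1.trans ((pvSK_perm s).filter _).symm
    have hfR : (pvSK (s ++ [x])).filter (fun a => decide (k0 < a))
        = (pvSK s).filter (fun a => decide (k0 < a)) := by
      apply pairwise_lt_eq_of_perm _ ((pvSK_pairwise _).filter _) ((pvSK_pairwise _).filter _)
      have h1 := (pvSK_perm (s ++ [x])).filter (fun a => decide (k0 < a))
      rw [hKf _ (decide_eq_false (lt_irrefl k0))] at h1
      exact h1.trans ((pvSK_perm s).filter _).symm
    set L := (pvSK s).filter (fun a => decide (a < k0)) with hL
    set R := (pvSK s).filter (fun a => decide (k0 < a)) with hR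
    have hk0mem' : k0 ∈ pvSK (s ++ [x]) := mem_pvSK.mpr ⟨x, by simp, rfl⟩
    have hSK' : pvSK (s ++ [x]) = L ++ k0 :: R := by
      rw [← hfL, ← hfR]
      exact pairwise_decomp_mem (pvSK_pairwise _) hk0mem'
    have hLlt : ∀ a ∈ L, a < k0 := by
      intro a ha; have := List.of_mem_filter ha; simpa using this
    have hRgt : ∀ a ∈ R, k0 < a := by
      intro a ha; have := List.of_mem_filter ha; simpa using this
    have hsplit : (pvSK s).flatMap (pvGrp s)
        = L.flatMap (pvGrp s) ++ pvGrp s k0 ++ R.flatMap (pvGrp s) := by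
      by_cases hmem : k0 ∈ pvSK s
      · have hdec := pairwise_decomp_mem (pvSK_pairwise s) hmem
        rw [← hL, ← hR] at hdec
        rw [hdec]; simp [List.flatMap_append]
      · have hdec := pairwise_decomp_not_mem (pvSK_pairwise s) hmem
        rw [← hL, ← hR] at hdec
        have hgnil : pvGrp s k0 = [] := by
          rw [pvGrp, List.filter_eq_nil_iff]
          intro c hc
          simp only [beq_iff_eq]
          intro hck
          exact hmem (mem_pvSK.mpr ⟨c, hc, hck⟩)
        rw [hdec]; simp [List.flatMap_append, hgnil]
    rw [sorted_append_one, ih, hsplit]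
    have hins := ins_split x (L.flatMap (pvGrp s) ++ pvGrp s k0) (R.flatMap (pvGrp s))
      (by
        intro a ha
        rcases List.mem_append.mp ha with hal | hak
        · rcases List.mem_flatMap.mp hal with ⟨k, hkL, hak⟩
          rw [pvGrp_key hak]; exact lt_asymm (hLlt k hkL)
        · rw [pvGrp_key hak]; exact lt_irrefl _)
      (by
        intro b hb
        rcases List.mem_flatMap.mp hb with ⟨k, hkR, hbk⟩
        rw [pvGrp_key hbk]; exact hRgt k hkR)
    rw [show L.flatMap (pvGrp s) ++ pvGrp s k0 ++ R.flatMap (pvGrp s)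
          = (L.flatMap (pvGrp s) ++ pvGrp s k0) ++ R.flatMap (pvGrp s) from rfl, hins, hSK']
    have hgrp' : ∀ k ∈ L ++ k0 :: R, pvGrp (s ++ [x]) k
        = pvGrp s k ++ if fcTopic x == k then [x] else [] := fun k _ => pvGrp_append_one s x k
    rw [List.flatMap_congr hgrp']
    have hLn : ∀ k ∈ L, pvGrp s k ++ (if fcTopic x == k then [x] else []) = pvGrp s k := by
      intro k hk
      rw [if_neg (by
        simp only [beq_iff_eq, ← hk0]
        exact fun h => absurd (h ▸ hLlt k hk) (lt_irrefl k))]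
      simp
    have hRn : ∀ k ∈ R, pvGrp s k ++ (if fcTopic x == k then [x] else []) = pvGrp s k := by
      intro k hk
      rw [if_neg (by
        simp only [beq_iff_eq, ← hk0]
        exact fun h => absurd (h ▸ hRgt k hk) (lt_irrefl k))]
      simp
    simp only [List.flatMap_append, List.flatMap_cons]
    rw [List.flatMap_congr hLn, List.flatMap_congr hRn,
        if_pos (by simp only [beq_iff_eq]; exact hk0.symm)]
    simp

-- A's grouping dict, looked up: getD k [] is the original-order group of topic k
theorem getD_group_fold (s : List (List (String × String)))
    (d : PySem.Dict String (List (List (String × String)))) (k : String) :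
    (s.foldl (fun d c => d.modify (fcTopic c) [] (· ++ [c])) d).getD k []
      = d.getD k [] ++ pvGrp s k := by
  induction s generalizing d with
  | nil => simp [pvGrp]
  | cons c t ih =>
    rw [List.foldl_cons, ih, PySem.Dict.getD_modify]
    by_cases h : k = fcTopic c
    · rw [if_pos h]
      subst h
      simp [pvGrp, List.append_assoc]
    · rw [if_neg h]
      have hb : (fcTopic c == k) = false := beq_eq_false_iff_ne.mpr (fun h' => h h'.symm)
      simp [pvGrp, hb]

-- the alt port's loop body after zeta-reduction (definitionally equal to the lambda in the port)
def pvStep (st : List String × Option String) (c : List (String × String)) :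
    List String × Option String :=
  ((if st.2 ≠ some (fcTopic c) then (st.1 ++ ["\n[" ++ fcTopic c ++ "]"], some (fcTopic c)) else st).1
      ++ [fcLine c],
   (if st.2 ≠ some (fcTopic c) then (st.1 ++ ["\n[" ++ fcTopic c ++ "]"], some (fcTopic c)) else st).2)

theorem foldB_tail (k : String) (cs : List (List (String × String)))
    (h : ∀ e ∈ cs, fcTopic e = k) (acc : List String) :
    List.foldl pvStep (acc, some k) cs = (acc ++ cs.map fcLine, some k) := by
  induction cs generalizing acc with
  | nil => simp
  | cons c t ih =>
    have hc : fcTopic c = k := h c List.mem_cons_self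
    rw [List.foldl_cons]
    have hstep : pvStep (acc, some k) c = (acc ++ [fcLine c], some k) := by
      simp [pvStep, hc]
    rw [hstep, ih (fun e he => h e (List.mem_cons_of_mem _ he))]
    simp

theorem foldB_chunk (k : String) (c : List (String × String)) (cs : List (List (String × String)))
    (h : ∀ e ∈ c :: cs, fcTopic e = k) (acc : List String) (prev : Option String)
    (hprev : prev ≠ some k) :
    List.foldl pvStep (acc, prev) (c :: cs)
      = (acc ++ pvHdr k :: (c :: cs).map fcLine, some k) := by
  have hc : fcTopic c = k := h c List.mem_cons_self
  rw [List.foldl_cons]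
  have hstep : pvStep (acc, prev) c = ((acc ++ [pvHdr k]) ++ [fcLine c], some k) := by
    simp [pvStep, pvHdr, hc, hprev]
  rw [hstep, foldB_tail k cs (fun e he => h e (List.mem_cons_of_mem _ he))]
  simp

-- B's one-pass loop over the concatenated groups produces header-plus-lines per group
theorem foldB_flat (sk : List String) (s : List (List (String × String)))
    (hpw : sk.Pairwise (· < ·)) (hne : ∀ k ∈ sk, pvGrp s k ≠ []) (acc : List String)
    (prev : Option String) (hprev : ∀ k ∈ sk, prev ≠ some k) :
    List.foldl pvStep (acc, prev) (sk.flatMap (pvGrp s))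
      = (acc ++ sk.flatMap (fun k => pvHdr k :: (pvGrp s k).map fcLine),
         sk.foldl (fun _ k => some k) prev) := by
  induction sk generalizing acc prev with
  | nil => simp
  | cons k t ih =>
    rcases List.pairwise_cons.mp hpw with ⟨hkt, hpt⟩
    obtain ⟨c, cs, hgrp⟩ : ∃ c cs, pvGrp s k = c :: cs := by
      cases hg : pvGrp s k with
      | nil => exact absurd hg (hne k List.mem_cons_self)
      | cons c cs => exact ⟨c, cs, rfl⟩
    rw [List.flatMap_cons, List.foldl_append, hgrp,
        foldB_chunk k c cs (fun e he => pvGrp_key (hgrp ▸ he)) acc prev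
          (hprev k List.mem_cons_self),
        ih hpt (fun k' hk' => hne k' (List.mem_cons_of_mem _ hk')) _ (some k)
          (fun k' hk' h => absurd ((Option.some.inj h) ▸ hkt k' hk') (lt_irrefl _))]
    rw [List.flatMap_cons, hgrp]
    simp [List.append_assoc]

-- A's line loop over the sorted items is a flatMap of header-plus-lines
theorem linesA (items : List (String × List (List (String × String)))) (acc : List String) :
    List.foldl
        (fun acc p => List.foldl (fun a c => a ++ [fcLine c]) (acc ++ ["\n[" ++ p.1 ++ "]"]) p.2)
        acc items
      = acc ++ items.flatMap (fun p => pvHdr p.1 :: p.2.map fcLine) := by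
  induction items generalizing acc with
  | nil => simp
  | cons p t ih =>
    rw [List.foldl_cons, PySem.List.foldl_append_singleton_eq_map, ih]
    simp [pvHdr, List.append_assoc]

-- A's grouping dict lists its items as (first-occurrence topic, group) pairs
theorem items_group_fold (s : List (List (String × String))) :
    (s.foldl (fun d c => d.modify (fcTopic c) [] (· ++ [c])) PySem.Dict.empty).items
      = (PySem.Set.ofList (s.map fcTopic)).map (fun k => (k, pvGrp s k)) := by
  have hkeys : (s.foldl (fun d c => d.modify (fcTopic c) [] (· ++ [c])) PySem.Dict.empty).keys
      = PySem.Set.ofList (s.map fcTopic) := by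
    rw [PySem.Dict.keys_foldl_modify_key s fcTopic [] (fun _ c => (· ++ [c])),
        PySem.Dict.keys_empty, PySem.Set.ofList_eq_foldl, PySem.Set.update_eq_foldl]
  have hnodup : (s.foldl (fun d c => d.modify (fcTopic c) [] (· ++ [c])) PySem.Dict.empty).keys.Nodup := by
    apply PySem.Dict.nodup_keys_foldl_modify_key s fcTopic [] (fun _ c => (· ++ [c]))
    rw [PySem.Dict.keys_empty]; exact List.nodup_nil
  rw [PySem.Dict.items_eq_map_keys _ hnodup [], hkeys]
  apply List.map_congr_left
  intro k _
  rw [getD_group_fold s PySem.Dict.empty k, PySem.Dict.getD_empty]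
  rfl

-- sorting the items by key lists the groups in sorted topic order
theorem sorted_items (s : List (List (String × String))) :
    PySem.List.sorted ((PySem.Set.ofList (s.map fcTopic)).map (fun k => (k, pvGrp s k)))
        (fun p => p.1)
      = (pvSK s).map (fun k => (k, pvGrp s k)) := by
  apply PySem.List.sorted_eq_of_perm_of_pairwise_lt
  · exact (pvSK_perm s).map _
  · exact List.pairwise_map.mpr (pvSK_pairwise s)

-- both ports compute the same canonical line list on a nonempty input
theorem portA_eq (concepts : List (List (String × String))) (max_concepts : Int)
    (hc : ¬ concepts = []) :
    format_concepts_for_prompt_py concepts max_concepts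
      = PySem.Str.join "\n"
          ((pvSK (PySem.List.slice concepts none (some max_concepts))).flatMap
            (fun k => pvHdr k ::
              (pvGrp (PySem.List.slice concepts none (some max_concepts)) k).map fcLine)) := by
  simp only [format_concepts_for_prompt_py, if_neg hc]
  rw [items_group_fold, sorted_items, linesA, List.flatMap_map]
  rfl

theorem portB_eq (concepts : List (List (String × String))) (max_concepts : Int)
    (hc : ¬ concepts = []) :
    format_concepts_for_prompt_py_alt concepts max_concepts
      = PySem.Str.join "\n"
          ((pvSK (PySem.List.slice concepts none (some max_concepts))).flatMap
            (fun k => pvHdr k ::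
              (pvGrp (PySem.List.slice concepts none (some max_concepts)) k).map fcLine)) := by
  have h0 : format_concepts_for_prompt_py_alt concepts max_concepts
      = PySem.Str.join "\n"
          (List.foldl pvStep ([], none)
            (PySem.List.sorted (PySem.List.slice concepts none (some max_concepts)) fcTopic)).1 := by
    simp only [format_concepts_for_prompt_py_alt, if_neg hc]
    rfl
  rw [h0, sorted_key_eq_flatMap_grp,
      foldB_flat (pvSK (PySem.List.slice concepts none (some max_concepts)))
        (PySem.List.slice concepts none (some max_concepts))
        (pvSK_pairwise _) (fun k hk => pvGrp_ne_nil (mem_pvSK.mp hk)) [] none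
        (fun k _ h => by cases h)]
  simp

-- ===== VERDICT (by name: the statement is the Claim_ definition above) =====
theorem format_concepts_for_prompt_py_spec : Claim_equal_format_concepts_for_prompt_py := by
  intro concepts max_concepts _ _
  unfold Spec_format_concepts_for_prompt_py
  by_cases hc : concepts = []
  · subst hc; rfl
  · rw [portA_eq _ _ hc, portB_eq _ _ hc]
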